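-- pv_equiv track=rewrite | github.com/alexandraback/datacollection | solutions_5636311922769920_0/Python/barisdemirdelen/fractal.py | solve_fractal
-- ===== SOURCE A (Python) =====
-- def solve_fractal(base_length, complexity, students):
--     permutations = []
--     current_permutation = []
--     for i in range(1, base_length + 1):
--         current_permutation.append(i)
--         if len(current_permutation) == complexity:
--             permutations.append(current_permutation)
--             current_permutation = []
--     if len(current_permutation) > 0:
--         while len(current_permutation) < complexity:
--             current_permutation.append(1)
--         permutations.append(current_permutation)
--
--     if students < len(permutations):
--         return ["IMPOSSIBLE"]
--
--     result = []
--     for permutation in permutations: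
--         tile = 1
--         for i, section in enumerate(permutation):
--             tile += (section - 1) * base_length ** i
--         result.append(tile)
--
--     return result
-- ===== SOURCE B (Python) =====
-- def solve_fractal(base_length, complexity, students):
--     starts = range(0, base_length, complexity)
--     if students < len(starts):
--         return ["IMPOSSIBLE"]
--     if not starts:
--         return []
--     first = 1 + sum(i * base_length ** i for i in range(complexity))
--     delta = complexity * sum(base_length ** i for i in range(complexity))
--     tiles = [first + k * delta for k, _ in enumerate(starts)]
--     rest = base_length % complexity
--     if rest:
--         last = base_length - rest
--         tiles[-1] = 1 + sum((last + i) * base_length ** i for i in range(rest))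
--     return tiles
-- ===== Notes on version B (the rewrite author's own statement) =====
-- stated objective: alternative
-- what changed: B generates the tiles as an arithmetic progression (a closed-form first tile plus a constant per-group delta = complexity * geometric power sum, with one direct sum replacing the last tile when the final group is partial) instead of A's two passes that materialize padded index chunks and re-scan each with a per-element power; Pre_ excludes complexity < 1 (outside the natural chunk-size domain; …
-- outside the precondition, e.g. on solve_fractal(3, 0, 5): A returns [22], B raises ValueError; on solve_fractal(5, 2, 1): A returns ['IMPOSSIBLE'], B returns ['IMPOSSIBLE']
import Mathlib
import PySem

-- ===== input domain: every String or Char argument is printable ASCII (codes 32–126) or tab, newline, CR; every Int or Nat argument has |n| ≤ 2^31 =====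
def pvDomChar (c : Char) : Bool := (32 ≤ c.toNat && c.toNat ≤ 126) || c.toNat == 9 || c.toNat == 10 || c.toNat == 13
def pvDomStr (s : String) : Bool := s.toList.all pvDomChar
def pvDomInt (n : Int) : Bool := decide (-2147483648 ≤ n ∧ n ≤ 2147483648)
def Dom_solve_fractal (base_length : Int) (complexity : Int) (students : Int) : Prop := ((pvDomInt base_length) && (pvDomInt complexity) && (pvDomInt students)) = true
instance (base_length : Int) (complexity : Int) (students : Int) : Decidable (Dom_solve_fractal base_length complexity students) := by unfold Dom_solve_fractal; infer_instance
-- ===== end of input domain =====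

-- B generates the tiles as an arithmetic progression (closed-form first tile plus a constant
-- per-group delta, one direct sum fixing the partial last group) instead of A's chunk lists with
-- a per-chunk inner product (objective: alternative; return-value equivalence on the domain in Pre_).

-- ===== PORT A =====
-- loop body of A's chunking loop over range(1, base_length+1)
def fractalStepA (c : Int) (s : List (List Int) × List Int) (i : Int) : List (List Int) × List Int :=
  let cur := s.2 ++ [i]
  if (cur.length : Int) = c then (s.1 ++ [cur], ([] : List Int)) else (s.1, cur)

-- A's tile loop: tile = 1; for i, section in enumerate(permutation): tile += (section-1)*base**i
def fractalTileA (bl : Int) (p : List Int) : Int :=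
  (PySem.List.enumerate p 0).foldl (fun tile q => tile + (q.2 - 1) * bl ^ q.1.toNat) 1

def solve_fractal (base_length : Int) (complexity : Int) (students : Int) : List Int :=
  let s := (PySem.List.pyRange 1 (base_length + 1) 1).foldl (fractalStepA complexity) ([], [])
  -- the 'while len(cur) < complexity: cur.append(1)' padding, as one replicate append
  let perms := if s.2.length > 0
    then s.1 ++ [s.2 ++ List.replicate (complexity - (s.2.length : Int)).toNat 1]
    else s.1
  if students < (perms.length : Int) then []  -- Python returns ["IMPOSSIBLE"] (a list of strings, not List Int); excluded by Pre_
  else perms.foldl (fun res p => res ++ [fractalTileA base_length p]) []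

-- ===== PORT B =====
def solve_fractal_alt (base_length : Int) (complexity : Int) (students : Int) : List Int :=
  let starts := PySem.List.pyRange 0 base_length complexity
  if students < (starts.length : Int) then []  -- Python returns ["IMPOSSIBLE"]; excluded by Pre_
  else if starts.isEmpty then []
  else
    let first := 1 + (PySem.List.pyRange 0 complexity 1).foldl
      (fun s i => s + i * base_length ^ i.toNat) 0
    let delta := complexity * (PySem.List.pyRange 0 complexity 1).foldl
      (fun s i => s + base_length ^ i.toNat) 0
    let tiles := (PySem.List.enumerate starts 0).map (fun q => first + q.1 * delta)
    let rest := PySem.Int.mod base_length complexity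
    if rest ≠ 0 then
      -- tiles[-1] = 1 + sum((last + i) * base_length**i for i in range(rest))
      let last := base_length - rest
      tiles.dropLast ++ [1 + (PySem.List.pyRange 0 rest 1).foldl
        (fun s i => s + (last + i) * base_length ^ i.toNat) 0]
    else tiles

-- ===== PRECONDITION & SPEC =====
-- Pre_ keeps complexity ≥ 1 (the natural chunk-size domain: for complexity ≤ 0 A's one-big-group
-- value is an accident of its loop and B's range/modulus raises for complexity = 0) and requires
-- students ≥ the group count ceil(base_length/complexity) capped below at 0 (below it A returns
-- ["IMPOSSIBLE"], a list of STRINGS, not a value of the declared List Int type).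
def Pre_solve_fractal (base_length : Int) (complexity : Int) (students : Int) : Prop :=
  1 ≤ complexity ∧ max (-(PySem.Int.floordiv (-base_length) complexity)) 0 ≤ students
instance (base_length : Int) (complexity : Int) (students : Int) : Decidable (Pre_solve_fractal base_length complexity students) := by unfold Pre_solve_fractal; infer_instance

def pvWitness_solve_fractal : Int × Int × Int := (4, 2, 3)

def Spec_solve_fractal (base_length : Int) (complexity : Int) (students : Int) (out : List Int) : Prop := out = solve_fractal_alt base_length complexity students
instance (base_length : Int) (complexity : Int) (students : Int) (out : List Int) : Decidable (Spec_solve_fractal base_length complexity students out) := by unfold Spec_solve_fractal; infer_instance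

-- ===== CLAIM =====
def Claim_equal_solve_fractal : Prop := ∀ (base_length : Int) (complexity : Int) (students : Int), Dom_solve_fractal base_length complexity students → Pre_solve_fractal base_length complexity students → Spec_solve_fractal base_length complexity students (solve_fractal base_length complexity students)

-- ===== LEMMAS AND PROOFS =====

-- Σ_{i<m} (start+i) * bl^i
def pvTileSum (bl start : Int) : Nat → Int
  | 0 => 0
  | m + 1 => pvTileSum bl start m + (start + m) * bl ^ m

-- Σ_{i<m} bl^i
def pvGeo (bl : Int) : Nat → Int
  | 0 => 0
  | m + 1 => pvGeo bl m + bl ^ m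

def pvChunk (c : Int) (k : Nat) : List Int := PySem.List.pyRange (↑k * c + 1) (↑k * c + c + 1) 1

lemma foldB_tile (bl o : Int) (m : Nat) : ∀ (a : Int),
    (PySem.List.pyRange 0 (m : Int) 1).foldl
      (fun s i => s + (o + i) * bl ^ i.toNat) a = a + pvTileSum bl o m := by
  induction m with
  | zero => intro a; simp [PySem.List.pyRange_one_eq_nil, pvTileSum]
  | succ m ih =>
      intro a
      have h : ((m + 1 : Nat) : Int) = (m : Int) + 1 := by push_cast; ring
      rw [h, PySem.List.pyRange_one_succ_right (by positivity), List.foldl_append, ih]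
      simp [pvTileSum]
      ring

lemma foldB_first (bl : Int) (m : Nat) :
    (PySem.List.pyRange 0 (m : Int) 1).foldl
      (fun s i => s + i * bl ^ i.toNat) 0 = pvTileSum bl 0 m := by
  have hfun : (fun (s i : Int) => s + i * bl ^ i.toNat)
      = (fun (s i : Int) => s + (0 + i) * bl ^ i.toNat) := by funext s i; ring_nf
  rw [hfun, foldB_tile]; ring

lemma foldB_geo (bl : Int) (m : Nat) : ∀ (a : Int),
    (PySem.List.pyRange 0 (m : Int) 1).foldl
      (fun s i => s + bl ^ i.toNat) a = a + pvGeo bl m := by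
  induction m with
  | zero => intro a; simp [PySem.List.pyRange_one_eq_nil, pvGeo]
  | succ m ih =>
      intro a
      have h : ((m + 1 : Nat) : Int) = (m : Int) + 1 := by push_cast; ring
      rw [h, PySem.List.pyRange_one_succ_right (by positivity), List.foldl_append, ih]
      simp [pvGeo]
      ring

lemma tileSum_shift (bl o : Int) (m : Nat) :
    pvTileSum bl o m = pvTileSum bl 0 m + o * pvGeo bl m := by
  induction m with
  | zero => simp [pvTileSum, pvGeo]
  | succ m ih => simp only [pvTileSum, pvGeo, ih]; ring

-- mapping a function of the index over enumerate
lemma map_enum_fst {α : Type} (f : Int → α) (xs : List Int) (s : Int) :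
    (PySem.List.enumerate xs s).map (fun q => f q.1)
    = (PySem.List.pyRange s (s + xs.length) 1).map f := by
  have h : (PySem.List.enumerate xs s).map (fun q : Int × Int => q.1)
      = PySem.List.pyRange s (s + xs.length) 1 := PySem.List.map_fst_enumerate xs s
  rw [← h, List.map_map]
  rfl

lemma tileA_range (bl start : Int) (m : Nat) :
    fractalTileA bl (PySem.List.pyRange (start + 1) (start + (m : Int) + 1) 1)
    = 1 + pvTileSum bl start m := by
  induction m with
  | zero =>
      simp [fractalTileA, pvTileSum, PySem.List.pyRange_one_eq_nil, PySem.List.enumerate_nil]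
  | succ m ih =>
      have h : start + ((m + 1 : Nat) : Int) + 1 = (start + (m : Int) + 1) + 1 := by
        push_cast; ring
      rw [h, PySem.List.pyRange_one_succ_right (by omega)]
      unfold fractalTileA at ih ⊢
      rw [PySem.List.enumerate_append, List.foldl_append, ih]
      have hl : (PySem.List.pyRange (start + 1) (start + (m : Int) + 1) 1).length = m := by
        rw [PySem.List.length_pyRange_one]; omega
      rw [hl]
      simp [PySem.List.enumerate_cons, PySem.List.enumerate_nil, pvTileSum]
      ring

lemma foldA_ones (bl : Int) (p : Nat) : ∀ (s t : Int),
    (PySem.List.enumerate (List.replicate p (1 : Int)) s).foldl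
      (fun tile q => tile + (q.2 - 1) * bl ^ q.1.toNat) t = t := by
  induction p with
  | zero => intro s t; simp [PySem.List.enumerate_nil]
  | succ p ih =>
      intro s t
      rw [List.replicate_succ, PySem.List.enumerate_cons]
      simp only [List.foldl]
      rw [show (1 : Int) - 1 = 0 by ring]
      simp [ih]

lemma tileA_pad (bl : Int) (L : List Int) (p : Nat) :
    fractalTileA bl (L ++ List.replicate p 1) = fractalTileA bl L := by
  unfold fractalTileA
  rw [PySem.List.enumerate_append, List.foldl_append, foldA_ones]

lemma pv_div_mod_succ (cN j : Nat) (h1 : 1 ≤ cN) :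
    (j % cN + 1 = cN → (j + 1) / cN = j / cN + 1) ∧
    (j % cN + 1 ≠ cN → (j + 1) / cN = j / cN) := by
  have hmd : j / cN * cN + j % cN = j := by
    rw [Nat.mul_comm]; exact Nat.div_add_mod j cN
  have hlt : j % cN < cN := Nat.mod_lt _ (by omega)
  constructor
  · intro h
    have := (Nat.div_mod_unique (a := j + 1) (b := cN) (d := j / cN + 1) (c := 0)
      (by omega)).mpr ⟨by rw [Nat.mul_succ]; rw [Nat.mul_comm cN (j / cN)]; omega, by omega⟩
    exact this.1
  · intro h
    have := (Nat.div_mod_unique (a := j + 1) (b := cN) (d := j / cN) (c := j % cN + 1)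
      (by omega)).mpr ⟨by rw [Nat.mul_comm cN (j / cN)]; omega, by omega⟩
    exact this.1

lemma foldA_state (c : Int) (hc : 1 ≤ c) (j : Nat) :
    (PySem.List.pyRange 1 ((j : Int) + 1) 1).foldl (fractalStepA c) ([], [])
    = ((List.range (j / c.toNat)).map (pvChunk c),
       PySem.List.pyRange (((j / c.toNat : Nat) : Int) * c + 1) ((j : Int) + 1) 1) := by
  lift c to Nat using (by omega) with cN
  have hcN : 1 ≤ cN := by exact_mod_cast hc
  simp only [Int.toNat_natCast]
  induction j with
  | zero =>
      simp [PySem.List.pyRange_one_eq_nil]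
  | succ j ih =>
      have hmd : j / cN * cN + j % cN = j := by
        rw [Nat.mul_comm]; exact Nat.div_add_mod j cN
      have hlt : j % cN < cN := Nat.mod_lt _ (by omega)
      have hcast : ((j + 1 : Nat) : Int) + 1 = ((j : Int) + 1) + 1 := by push_cast; ring
      rw [hcast, PySem.List.pyRange_one_succ_right (by omega), List.foldl_append, ih]
      simp only [List.foldl]
      have hle : (((j / cN : Nat) : Int) * (cN : Int) + 1) ≤ (j : Int) + 1 := by
        rw [← Nat.cast_mul]; omega
      have hcur : PySem.List.pyRange (((j / cN : Nat) : Int) * (cN : Int) + 1) ((j : Int) + 1) 1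
            ++ [(j : Int) + 1]
          = PySem.List.pyRange (((j / cN : Nat) : Int) * (cN : Int) + 1) (((j : Int) + 1) + 1) 1 :=
        (PySem.List.pyRange_one_succ_right hle).symm
      simp only [fractalStepA]
      rw [hcur]
      have hlen : ((PySem.List.pyRange (((j / cN : Nat) : Int) * (cN : Int) + 1)
          (((j : Int) + 1) + 1) 1).length : Int) = (j : Int) + 1 - ((j / cN : Nat) : Int) * (cN : Int) := by
        rw [PySem.List.length_pyRange_one]
        rw [← Nat.cast_mul] at hle ⊢
        omega
      by_cases hcond : j % cN + 1 = cN
      · have hdiv : (j + 1) / cN = j / cN + 1 := (pv_div_mod_succ cN j hcN).1 hcond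
        rw [if_pos (by rw [hlen, ← Nat.cast_mul]; omega)]
        rw [hdiv, List.range_succ, List.map_append]
        have hchunk : pvChunk (cN : Int) (j / cN)
            = PySem.List.pyRange (((j / cN : Nat) : Int) * (cN : Int) + 1) (((j : Int) + 1) + 1) 1 := by
          rw [pvChunk]
          congr 1
          rw [← Nat.cast_mul]; omega
        have hnil : PySem.List.pyRange (((j / cN + 1 : Nat) : Int) * (cN : Int) + 1)
            ((((j : Int)) + 1) + 1) 1 = [] := by
          apply PySem.List.pyRange_one_eq_nil
          have : (j / cN + 1) * cN = j / cN * cN + cN := Nat.succ_mul _ _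
          rw [← Nat.cast_mul]; omega
        rw [hnil]
        simp only [List.map_cons, List.map_nil]
        rw [hchunk]
      · have hdiv : (j + 1) / cN = j / cN := (pv_div_mod_succ cN j hcN).2 hcond
        rw [if_neg (by rw [hlen, ← Nat.cast_mul]; omega)]
        rw [hdiv]

lemma pv_main (bl c st : Int) (h : Pre_solve_fractal bl c st) :
    solve_fractal bl c st = solve_fractal_alt bl c st := by
  obtain ⟨hc, hst⟩ := h
  have hst0 : 0 ≤ st := le_trans (le_max_right _ _) hst
  lift c to Nat using (by omega) with cN
  have hcN : 1 ≤ cN := by exact_mod_cast hc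
  have hcN' : (0:Int) < ↑cN := by exact_mod_cast hcN
  by_cases hbl : bl ≤ 0
  · -- base_length ≤ 0: both return []
    have hAnil : PySem.List.pyRange 1 (bl + 1) 1 = [] :=
      PySem.List.pyRange_one_eq_nil (by omega)
    have hBnil : PySem.List.pyRange 0 bl (↑cN) = [] := by
      rw [List.eq_nil_iff_forall_not_mem]
      intro x hx
      have := (PySem.List.mem_pyRange_iff_of_pos hcN' x).mp hx
      omega
    simp [solve_fractal, solve_fractal_alt, hAnil, hBnil, show ¬ st < 0 by omega]
  · lift bl to Nat using (by omega) with N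
    have hN : 1 ≤ N := by omega
    set Q := N / cN with hQdef
    set R := N % cN with hRdef
    have hmd : Q * cN + R = N := by rw [hQdef, hRdef, Nat.mul_comm]; exact Nat.div_add_mod N cN
    have hRlt : R < cN := Nat.mod_lt _ (by omega)
    -- the group count
    set G := Q + (if R = 0 then 0 else 1) with hGdef
    have hceil : -(PySem.Int.floordiv (-((N:Nat) : Int)) (↑cN)) = (G : Int) := by
      rw [PySem.Int.neg_floordiv_neg_eq_iff_of_pos hcN']
      by_cases hR0 : R = 0
      · have hG : G = Q := by simp [hGdef, hR0]
        rw [hG]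
        constructor
        · rw [show ((Q:Int) - 1) * ↑cN = ↑(Q * cN) - ↑cN by push_cast; ring]; omega
        · rw [show ((Q:Int)) * ↑cN = ↑(Q * cN) by push_cast; ring]; omega
      · have hG : G = Q + 1 := by rw [hGdef, if_neg hR0]
        rw [hG]
        constructor
        · rw [show (((Q + 1 : Nat) : Int) - 1) * ↑cN = ↑(Q * cN) by push_cast; ring]; omega
        · rw [show ((Q + 1 : Nat) : Int) * ↑cN = ↑(Q * cN) + ↑cN by push_cast; ring]; omega
    have hstG : (G : Int) ≤ st := by
      rw [hceil] at hst
      exact le_trans (le_max_left _ _) hst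
    -- the ceiling division in Nat
    have hlenNat : (N + cN - 1) / cN = G := by
      have hsplit : N + cN - 1 = (R + cN - 1) + Q * cN := by omega
      rw [hsplit, Nat.add_mul_div_right _ _ (by omega), hGdef]
      by_cases hR0 : R = 0
      · rw [if_pos hR0, hR0, show 0 + cN - 1 = cN - 1 by omega,
          Nat.div_eq_of_lt (by omega)]
        omega
      · rw [if_neg hR0, show R + cN - 1 = (R - 1) + cN by omega,
          Nat.add_div_right _ (by omega), Nat.div_eq_of_lt (by omega)]
        omega
    -- B's starts list has length G
    have hlenB : (PySem.List.pyRange 0 ((N:Nat) : Int) (↑cN)).length = G := by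
      rw [PySem.List.pyRange_of_pos _ _ hcN', List.length_map, List.length_range,
        if_pos (by exact_mod_cast hN)]
      have hc1 : ((N:Nat) : Int) - 0 + ↑cN - 1 = ((N + cN - 1 : Nat) : Int) := by
        omega
      rw [hc1, show ((N + cN - 1 : Nat) : Int) / (↑cN : Int) = (((N + cN - 1) / cN : Nat) : Int)
        from (Int.natCast_ediv _ _).symm, Int.toNat_natCast, hlenNat]
    -- the tile of a full chunk k equals first + k * delta
    have htile : ∀ k, k < Q →
        fractalTileA (↑N) (pvChunk (↑cN) k)
        = (1 + pvTileSum (↑N) 0 cN) + (k : Int) * (↑cN * pvGeo (↑N) cN) := by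
      intro k hk
      have hful : PySem.List.pyRange ((k:Int) * ↑cN + 1) ((k:Int) * ↑cN + ↑cN + 1) 1
          = PySem.List.pyRange ((k:Int) * ↑cN + 1) ((k:Int) * ↑cN + ((cN : Nat) : Int) + 1) 1 := rfl
      rw [pvChunk, hful, tileA_range, tileSum_shift]
      ring
    -- B's starts list is nonempty
    have hGpos : 1 ≤ G := by
      rw [hGdef]
      by_cases hR0 : R = 0
      · rw [if_pos hR0]
        have hcle : cN ≤ N := by
          by_contra hlt
          have := Nat.mod_eq_of_lt (show N < cN by omega)
          omega
        have := Nat.div_pos hcle (by omega)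
        rw [← hQdef] at this
        simpa using this
      · rw [if_neg hR0]
        exact Nat.le_add_left 1 Q
    have hne : ¬ (PySem.List.pyRange 0 ((N:Nat) : Int) (↑cN)).isEmpty = true := by
      rw [List.isEmpty_iff]
      intro hnil
      rw [hnil] at hlenB
      simp at hlenB
      omega
    -- unfold port B
    simp only [solve_fractal_alt]
    rw [hlenB, if_neg (not_lt.mpr hstG), if_neg hne, foldB_first, foldB_geo]
    rw [map_enum_fst (f := fun j => 1 + pvTileSum (↑N) 0 cN + j * (↑cN * (0 + pvGeo (↑N) cN)))]
    rw [hlenB, show (0 : Int) + ((G:Nat) : Int) = ((G:Nat) : Int) by ring,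
      PySem.List.pyRange_zero_natCast, List.map_map]
    rw [show PySem.Int.mod ((N:Nat) : Int) (↑cN) = ((R : Nat) : Int) by
      rw [hRdef]; exact_mod_cast PySem.Int.mod_natCast N cN]
    -- unfold port A
    simp only [solve_fractal]
    rw [foldA_state _ hc N]
    simp only [Int.toNat_natCast, ← hQdef]
    have hcurlen : (PySem.List.pyRange ((Q : Int) * ↑cN + 1) ((N : Int) + 1) 1).length = R := by
      rw [PySem.List.length_pyRange_one, ← Nat.cast_mul]; omega
    rw [hcurlen]
    by_cases hR0 : R = 0
    · -- divisible case: no partial group, the ifs on rest do not fire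
      have hGQ : G = Q := by simp [hGdef, hR0]
      have hRZ : ((R:Nat) : Int) = 0 := by exact_mod_cast hR0
      rw [if_neg (show ¬ R > 0 by omega)]
      rw [List.length_map, List.length_range]
      rw [if_neg (show ¬ st < ((Q : Nat) : Int) by
        have h1 := hstG; rw [hGQ] at h1; exact not_lt.mpr h1)]
      rw [if_neg (show ¬ ((R:Nat) : Int) ≠ 0 by simp [hRZ])]
      rw [PySem.List.foldl_append_singleton_eq_map, List.nil_append, List.map_map, hGQ]
      apply List.map_congr_left
      intro k hk
      simp only [Function.comp]
      rw [htile k (List.mem_range.mp hk)]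
      ring
    · -- non-divisible case: the last tile is replaced by the partial-group sum
      have hGQ : G = Q + 1 := by rw [hGdef, if_neg hR0]
      have hRnz : ((R:Nat) : Int) ≠ 0 := Int.natCast_ne_zero.mpr hR0
      rw [hGQ]
      rw [if_pos (show R > 0 by omega)]
      rw [List.length_append, List.length_map, List.length_range, List.length_cons,
        List.length_nil]
      rw [if_neg (show ¬ st < ((Q + (0 + 1) : Nat) : Int) by
        have h1 := hstG
        rw [hGQ] at h1
        push_cast at h1 ⊢
        omega)]
      rw [if_pos hRnz]
      rw [List.range_succ, List.map_append, List.map_cons, List.map_nil, List.dropLast_concat]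
      rw [PySem.List.foldl_append_singleton_eq_map, List.nil_append, List.map_append,
        List.map_map, List.map_cons, List.map_nil]
      have htail : fractalTileA (↑N) (PySem.List.pyRange ((Q : Int) * ↑cN + 1) ((N : Int) + 1) 1
            ++ List.replicate ((↑cN - ((R:Nat) : Int)).toNat) 1)
          = 1 + (PySem.List.pyRange 0 ((R : Nat) : Int) 1).foldl
              (fun s i => s + ((((N:Nat) : Int) - ((R:Nat):Int)) + i) * (↑N) ^ i.toNat) 0 := by
        rw [foldB_tile, tileA_pad]
        have hlast : ((N:Nat) : Int) - ((R:Nat) : Int) = (Q : Int) * ↑cN := by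
          rw [← Nat.cast_mul]; omega
        have hcur : PySem.List.pyRange ((Q : Int) * ↑cN + 1) ((N : Int) + 1) 1
            = PySem.List.pyRange ((Q : Int) * ↑cN + 1) ((Q : Int) * ↑cN + ((R : Nat) : Int) + 1) 1 := by
          congr 1
          rw [← Nat.cast_mul]; omega
        rw [hcur, tileA_range, hlast]
        ring
      refine congrArg₂ (· ++ ·) ?_ ?_
      · apply List.map_congr_left
        intro k hk
        simp only [Function.comp]
        rw [htile k (List.mem_range.mp hk)]
        ring
      · exact congrArg (fun t => [t]) htail

-- ===== VERDICT (by name: the statement is the Claim_ definition above) =====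
theorem solve_fractal_spec : Claim_equal_solve_fractal := by
  intro bl c st _ hpre
  exact pv_main bl c st hpre
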